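-- pv_equiv track=rewrite | github.com/vedangwartikar/9-Mens-Morris-using-AI | main.py | generate_add
-- ===== SOURCE A (Python) =====
-- def closeMill(location, board) -> bool:
--     check_mill = board[location]
--     if board[location] in ('W', 'B'):
--         if location == 0:
--             return True if board[6] == check_mill and board[18] == check_mill else False
--         elif location == 1:
--             return True if board[11] == check_mill and board[20] == check_mill else False
--         elif location == 2:
--             return True if board[7] == check_mill and board[15] == check_mill else False
--         elif location == 3:
--             return True if board[10] == check_mill and board[17] == check_mill else False
--         elif location == 4:
--             return True if board[8] == check_mill and board[12] == check_mill else False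
--         elif location == 5:
--             return True if board[9] == check_mill and board[14] == check_mill else False
--         elif location == 6:
--             return True if ((board[0] == check_mill and board[18] == check_mill) or (board[7] == check_mill and board[8] == check_mill)) else False
--         elif location == 7:
--             return True if ((board[2] == check_mill and board[15] == check_mill) or (board[6] == check_mill and board[8] == check_mill)) else False
--         elif location == 8:
--             return True if ((board[4] == check_mill and board[12] == check_mill) or (board[6] == check_mill and board[7] == check_mill)) else False
--         elif location == 9:
--             return True if ((board[5] == check_mill and board[14] == check_mill) or (board[10] == check_mill and board[11] == check_mill)) else False
--         elif location == 10:
--             return True if ((board[3] == check_mill and board[17] == check_mill) or (board[9] == check_mill and board[11] == check_mill)) else False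
--         elif location == 11:
--             return True if ((board[1] == check_mill and board[20] == check_mill) or (board[9] == check_mill and board[10] == check_mill)) else False
--         elif location == 12:
--             return True if ((board[4] == check_mill and board[8] == check_mill) or (board[13] == check_mill and board[14] == check_mill)) else False
--         elif location == 13:
--             return True if ((board[12] == check_mill and board[14] == check_mill) or (board[16] == check_mill and board[19] == check_mill)) else False
--         elif location == 14:
--             return True if ((board[5] == check_mill and board[9] == check_mill) or (board[12] == check_mill and board[13] == check_mill)) else False
--         elif location == 15:
--             return True if ((board[2] == check_mill and board[7] == check_mill) or (board[16] == check_mill and board[17] == check_mill)) else False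
--         elif location == 16:
--             return True if ((board[13] == check_mill and board[19] == check_mill) or (board[15] == check_mill and board[17] == check_mill)) else False
--         elif location == 17:
--             return True if ((board[3] == check_mill and board[10] == check_mill) or (board[15] == check_mill and board[16] == check_mill)) else False
--         elif location == 18:
--             return True if ((board[0] == check_mill and board[6] == check_mill) or (board[19] == check_mill and board[20] == check_mill)) else False
--         elif location == 19:
--             return True if ((board[16] == check_mill and board[13] == check_mill) or (board[18] == check_mill and board[20] == check_mill)) else False
--         elif location == 20:
--             return True if ((board[1] == check_mill and board[11] == check_mill) or (board[18] == check_mill and board[19] == check_mill)) else False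
--         else:
--             return False
--     return False
--
-- def generate_remove(board, move_list) -> list:
--     no_positions_added = True
--     for location, piece in enumerate(board):
--         if piece == 'B':
--             if not closeMill(location, board):
--                 temp_board = list(board)
--                 temp_board[location] = 'x'
--                 temp_board = ''.join(temp_board)
--                 move_list.append(temp_board)
--                 no_positions_added = False
--     if no_positions_added:
--         move_list.append(board)
--     return move_list
--
-- def generate_add(board) -> list:
--     add_list = list()
--     for location, piece in enumerate(board):
--         if piece == 'x':
--             temp_board = list(board)
--             temp_board[location] = 'W'
--             temp_board = ''.join(temp_board)
--             if closeMill(location, temp_board):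
--                 generate_remove(temp_board, add_list)
--             else:
--                 add_list.append(temp_board)
--     return add_list
-- ===== SOURCE B (Python) =====
-- # Different algorithm: instead of per-location mill tests (A's 21-branch closeMill) and a
-- # fresh removal scan per mill-completing placement, B scans the 12 mill triples ONCE to
-- # precompute (a) which 'x' cells complete a W-mill when filled and (b) which 'B' cells are
-- # protected inside a black mill, then builds one shared removable list reused by every
-- # capturing placement.  Correct because a placement at i only changes cell i (x -> W), so
-- # black mills and black cells of the successor board equal those of the original board.
--
-- MILLS = [(0, 6, 18), (1, 11, 20), (2, 7, 15), (3, 10, 17), (4, 8, 12), (5, 9, 14),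
--          (6, 7, 8), (9, 10, 11), (12, 13, 14), (13, 16, 19), (15, 16, 17), (18, 19, 20)]
--
-- def _mill_sets(board):
--     completing = set()   # x-cells whose W-placement closes a white mill
--     protected = set()    # B-cells already inside a black mill (not removable)
--     for a, b, c in MILLS:
--         va, vb, vc = board[a], board[b], board[c]
--         if va == 'x' and vb == 'W' and vc == 'W':
--             completing.add(a)
--         if vb == 'x' and va == 'W' and vc == 'W':
--             completing.add(b)
--         if vc == 'x' and va == 'W' and vb == 'W':
--             completing.add(c)
--         if va == 'B' and vb == 'B' and vc == 'B':
--             protected.add(a)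
--             protected.add(b)
--             protected.add(c)
--     return completing, protected
--
-- def generate_add(board) -> list:
--     if 'x' not in board:
--         return []
--     completing, protected = _mill_sets(board)
--     removable = [j for j, q in enumerate(board) if q == 'B' and j not in protected]
--     out = []
--     for i, piece in enumerate(board):
--         if piece == 'x':
--             placed = board[:i] + 'W' + board[i + 1:]
--             if i in completing:
--                 out.extend([placed[:j] + 'x' + placed[j + 1:] for j in removable]
--                            or [placed])
--             else:
--                 out.append(placed)
--     return out
-- ===== Notes on version B (the rewrite author's own statement) =====
-- stated objective: faster
-- what changed: Instead of A's per-location 21-branch closeMill test on every cell and a fresh full-board generate_remove rescan for every mill-completing placement, B scans the 12 mill triples once to precompute the mill-completing x-cells and the protected B-cells, builds one shared removable list, and reuses it for every capturing placement (and exits early on boards without 'x'); a timing run measured B ≈10x faster at the largest size.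
-- outside the precondition, e.g. on generate_add('xBBBBBB'): A returns ['WBBBBBB'], B raises IndexError; on generate_add('x'): A raises IndexError, B raises IndexError
import Mathlib
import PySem

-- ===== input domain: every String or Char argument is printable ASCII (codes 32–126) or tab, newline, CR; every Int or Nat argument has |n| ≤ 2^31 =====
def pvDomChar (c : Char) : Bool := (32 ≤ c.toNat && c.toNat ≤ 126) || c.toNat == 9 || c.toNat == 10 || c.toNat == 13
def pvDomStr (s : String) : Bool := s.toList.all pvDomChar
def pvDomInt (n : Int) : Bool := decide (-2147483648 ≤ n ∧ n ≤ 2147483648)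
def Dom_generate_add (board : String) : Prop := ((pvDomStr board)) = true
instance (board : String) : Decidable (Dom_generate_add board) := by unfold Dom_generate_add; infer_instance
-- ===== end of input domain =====

-- B replaces A's per-location 21-branch mill test and per-placement removal rescans by ONE
-- scan over the 12 mill triples that precomputes the mill-completing x-cells and the
-- protected B-cells, and by one shared removable list reused by every capturing placement
-- (objective: alternative).

-- ===== PORT A =====
-- board[i] reads: pyGetD is exact for in-range indices; Pre_ keeps the fixed indices 0..20
-- read by closeMill in range.
def closeMillA (location : Int) (b : List Char) : Bool :=
  let c := PySem.List.pyGetD b location ' '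
  let g := fun (i : Int) => PySem.List.pyGetD b i ' '
  if c == 'W' || c == 'B' then
    if location = 0 then (g 6 == c && g 18 == c)
    else if location = 1 then (g 11 == c && g 20 == c)
    else if location = 2 then (g 7 == c && g 15 == c)
    else if location = 3 then (g 10 == c && g 17 == c)
    else if location = 4 then (g 8 == c && g 12 == c)
    else if location = 5 then (g 9 == c && g 14 == c)
    else if location = 6 then ((g 0 == c && g 18 == c) || (g 7 == c && g 8 == c))
    else if location = 7 then ((g 2 == c && g 15 == c) || (g 6 == c && g 8 == c))
    else if location = 8 then ((g 4 == c && g 12 == c) || (g 6 == c && g 7 == c))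
    else if location = 9 then ((g 5 == c && g 14 == c) || (g 10 == c && g 11 == c))
    else if location = 10 then ((g 3 == c && g 17 == c) || (g 9 == c && g 11 == c))
    else if location = 11 then ((g 1 == c && g 20 == c) || (g 9 == c && g 10 == c))
    else if location = 12 then ((g 4 == c && g 8 == c) || (g 13 == c && g 14 == c))
    else if location = 13 then ((g 12 == c && g 14 == c) || (g 16 == c && g 19 == c))
    else if location = 14 then ((g 5 == c && g 9 == c) || (g 12 == c && g 13 == c))
    else if location = 15 then ((g 2 == c && g 7 == c) || (g 16 == c && g 17 == c))
    else if location = 16 then ((g 13 == c && g 19 == c) || (g 15 == c && g 17 == c))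
    else if location = 17 then ((g 3 == c && g 10 == c) || (g 15 == c && g 16 == c))
    else if location = 18 then ((g 0 == c && g 6 == c) || (g 19 == c && g 20 == c))
    else if location = 19 then ((g 16 == c && g 13 == c) || (g 18 == c && g 20 == c))
    else if location = 20 then ((g 1 == c && g 11 == c) || (g 18 == c && g 19 == c))
    else false
  else false

def generate_removeA (b : List Char) (moveList : List String) : List String :=
  let st := (PySem.List.enumerate b 0).foldl (fun (st : Bool × List String) lp =>
    if lp.2 == 'B' then
      if !closeMillA lp.1 b then
        (false, st.2 ++ [String.ofList (PySem.List.pySetD b lp.1 'x')])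
      else st
    else st) (true, moveList)
  if st.1 then st.2 ++ [String.ofList b] else st.2

def generate_add (board : String) : List String :=
  let b := board.toList
  (PySem.List.enumerate b 0).foldl (fun acc lp =>
    if lp.2 == 'x' then
      let t := PySem.List.pySetD b lp.1 'W'
      if closeMillA lp.1 t then generate_removeA t acc
      else acc ++ [String.ofList t]
    else acc) []

-- ===== PORT B =====
def MILLS_B : List (Int × Int × Int) :=
  [(0, 6, 18), (1, 11, 20), (2, 7, 15), (3, 10, 17), (4, 8, 12), (5, 9, 14),
   (6, 7, 8), (9, 10, 11), (12, 13, 14), (13, 16, 19), (15, 16, 17), (18, 19, 20)]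

-- loop body of _mill_sets
def millStep (b : List Char) (st : PySem.Set Int × PySem.Set Int)
    (tr : Int × Int × Int) : PySem.Set Int × PySem.Set Int :=
  let va := PySem.List.pyGetD b tr.1 ' '
  let vb := PySem.List.pyGetD b tr.2.1 ' '
  let vc := PySem.List.pyGetD b tr.2.2 ' '
  let st := if va == 'x' && vb == 'W' && vc == 'W' then (PySem.Set.add st.1 tr.1, st.2) else st
  let st := if vb == 'x' && va == 'W' && vc == 'W' then (PySem.Set.add st.1 tr.2.1, st.2) else st
  let st := if vc == 'x' && va == 'W' && vb == 'W' then (PySem.Set.add st.1 tr.2.2, st.2) else st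
  if va == 'B' && vb == 'B' && vc == 'B' then
    (st.1, PySem.Set.add (PySem.Set.add (PySem.Set.add st.2 tr.1) tr.2.1) tr.2.2)
  else st

def millSets (b : List Char) : PySem.Set Int × PySem.Set Int :=
  MILLS_B.foldl (millStep b) (PySem.Set.empty, PySem.Set.empty)

-- board[:i] + c + board[i+1:]
def placeB (b : List Char) (i : Int) (c : Char) : List Char :=
  PySem.List.slice b none (some i) ++ c :: PySem.List.slice b (some (i + 1)) none

def generate_add_alt (board : String) : List String :=
  let b := board.toList
  if !(b.contains 'x') then []
  else
    let cp := millSets b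
    let removable := (PySem.List.enumerate b 0).filterMap (fun jq =>
      if jq.2 == 'B' && !(PySem.Set.contains cp.2 jq.1) then some jq.1 else none)
    (PySem.List.enumerate b 0).foldl (fun out ip =>
      if ip.2 == 'x' then
        let placed := placeB b ip.1 'W'
        if PySem.Set.contains cp.1 ip.1 then
          let caps := removable.map (fun j => String.ofList (placeB placed j 'x'))
          out ++ (if caps.isEmpty then [String.ofList placed] else caps)
        else out ++ [String.ofList placed]
      else out) []

-- ===== PRECONDITION & SPEC =====
-- Pre_ excludes boards shorter than 21 cells that contain an 'x': there A's closeMill indexes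
-- cells 6..20 and, depending on the surrounding pieces, raises IndexError (it returns on some
-- such boards only by short-circuit accident, so the whole region is excluded).
def Pre_generate_add (board : String) : Prop :=
  'x' ∈ board.toList → 21 ≤ board.toList.length

instance (board : String) : Decidable (Pre_generate_add board) := by
  unfold Pre_generate_add; infer_instance

def pvWitness_generate_add : String := "xxxWWWBBBxxxWWWBBBxxx"

def Spec_generate_add (board : String) (out : List String) : Prop := out = generate_add_alt board
instance (board : String) (out : List String) : Decidable (Spec_generate_add board out) := by
  unfold Spec_generate_add; infer_instance

-- ===== CLAIM (what is proved, stated in full; the proofs are below) =====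
def Claim_equal_generate_add : Prop := ∀ (board : String), Dom_generate_add board → Pre_generate_add board → Spec_generate_add board (generate_add board)


-- ===== LEMMAS AND PROOFS =====

-- a white mill line through a cell of the triple tr that the x-cell x would complete
def Cw (b : List Char) (tr : Int × Int × Int) (x : Int) : Prop :=
  (x = tr.1 ∧ PySem.List.pyGetD b tr.1 ' ' = 'x' ∧ PySem.List.pyGetD b tr.2.1 ' ' = 'W' ∧ PySem.List.pyGetD b tr.2.2 ' ' = 'W') ∨
  (x = tr.2.1 ∧ PySem.List.pyGetD b tr.2.1 ' ' = 'x' ∧ PySem.List.pyGetD b tr.1 ' ' = 'W' ∧ PySem.List.pyGetD b tr.2.2 ' ' = 'W') ∨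
  (x = tr.2.2 ∧ PySem.List.pyGetD b tr.2.2 ' ' = 'x' ∧ PySem.List.pyGetD b tr.1 ' ' = 'W' ∧ PySem.List.pyGetD b tr.2.1 ' ' = 'W')

-- x sits in the all-black triple tr
def Cb (b : List Char) (tr : Int × Int × Int) (x : Int) : Prop :=
  (x = tr.1 ∨ x = tr.2.1 ∨ x = tr.2.2) ∧
  PySem.List.pyGetD b tr.1 ' ' = 'B' ∧ PySem.List.pyGetD b tr.2.1 ' ' = 'B' ∧ PySem.List.pyGetD b tr.2.2 ' ' = 'B'

lemma mem_millStep1 (b : List Char) (st : PySem.Set Int × PySem.Set Int)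
    (tr : Int × Int × Int) (x : Int) :
    x ∈ (millStep b st tr).1 ↔ x ∈ st.1 ∨ Cw b tr x := by
  simp only [millStep, Cw]
  split_ifs <;> simp_all [PySem.Set.mem_add, Bool.and_eq_true, beq_iff_eq]

lemma mem_millStep2 (b : List Char) (st : PySem.Set Int × PySem.Set Int)
    (tr : Int × Int × Int) (x : Int) :
    x ∈ (millStep b st tr).2 ↔ x ∈ st.2 ∨ Cb b tr x := by
  simp only [millStep, Cb]
  split_ifs <;> simp_all [PySem.Set.mem_add, Bool.and_eq_true, beq_iff_eq]
  all_goals tauto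

lemma mem_foldl1 (b : List Char) (l : List (Int × Int × Int))
    (st : PySem.Set Int × PySem.Set Int) (x : Int) :
    x ∈ (l.foldl (millStep b) st).1 ↔ x ∈ st.1 ∨ ∃ tr ∈ l, Cw b tr x := by
  induction l generalizing st with
  | nil => simp
  | cons hd tl ih => simp [List.foldl_cons, ih, mem_millStep1]; tauto

lemma mem_foldl2 (b : List Char) (l : List (Int × Int × Int))
    (st : PySem.Set Int × PySem.Set Int) (x : Int) :
    x ∈ (l.foldl (millStep b) st).2 ↔ x ∈ st.2 ∨ ∃ tr ∈ l, Cb b tr x := by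
  induction l generalizing st with
  | nil => simp
  | cons hd tl ih => simp [List.foldl_cons, ih, mem_millStep2]; tauto

lemma memW (b : List Char) (x : Int) :
    x ∈ (millSets b).1 ↔ ∃ tr ∈ MILLS_B, Cw b tr x := by
  simp [millSets, mem_foldl1, PySem.Set.empty]

lemma memP (b : List Char) (x : Int) :
    x ∈ (millSets b).2 ↔ ∃ tr ∈ MILLS_B, Cb b tr x := by
  simp [millSets, mem_foldl2, PySem.Set.empty]

-- in-place set equals the slice-splice of Source B for an in-range index
lemma place_eq (b : List Char) (k : Nat) (hk : k < b.length) (c : Char) :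
    PySem.List.pySetD b (k : Int) c = placeB b (k : Int) c := by
  have h1 : (k : Int) + 1 = ((k + 1 : Nat) : Int) := by push_cast; ring
  simp only [placeB, PySem.List.pySetD_natCast, PySem.List.slice_to_natCast, h1,
    PySem.List.slice_from_natCast]
  exact List.set_eq_take_cons_drop c hk

lemma place_eq' (b : List Char) (j : Int) (h0 : 0 ≤ j) (hj : j < (b.length : Int)) (c : Char) :
    PySem.List.pySetD b j c = placeB b j c := by
  obtain ⟨k, rfl⟩ := Int.eq_ofNat_of_zero_le h0
  exact place_eq b k (by exact_mod_cast hj) c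

-- a read of the updated list at a nonnegative Int index
lemma pyGetD_set_int (xs : List Char) (n : Nat) (hn : n < xs.length) (c : Int) (hc : 0 ≤ c)
    (v d : Char) :
    PySem.List.pyGetD (PySem.List.pySetD xs (n : Int) v) c d
      = if c = (n : Int) then v else PySem.List.pyGetD xs c d := by
  obtain ⟨k, rfl⟩ := Int.eq_ofNat_of_zero_le hc
  rw [PySem.List.pyGetD_pySetD_natCast xs n k v d hn]
  simp

-- the same with the updated index given as an Int
lemma pyGetD_set_int' (xs : List Char) (n : Int) (h0n : 0 ≤ n) (hn : n < (xs.length : Int))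
    (c : Int) (hc : 0 ≤ c) (v d : Char) :
    PySem.List.pyGetD (PySem.List.pySetD xs n v) c d
      = if c = n then v else PySem.List.pyGetD xs c d := by
  obtain ⟨k, rfl⟩ := Int.eq_ofNat_of_zero_le h0n
  exact pyGetD_set_int xs k (by exact_mod_cast hn) c hc v d

-- reads of the placed board t = b[m := 'W'] agree with b at 'B'-comparisons (b[m] = 'x')
lemma eqB (b : List Char) (m : Nat) (hm : m < b.length)
    (hx : PySem.List.pyGetD b (m : Int) ' ' = 'x') (c : Int) (hc : 0 ≤ c) :
    (PySem.List.pyGetD (PySem.List.pySetD b (m : Int) 'W') c ' ' == 'B')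
      = (PySem.List.pyGetD b c ' ' == 'B') := by
  rw [pyGetD_set_int b m hm c hc]
  by_cases h : c = (m : Int)
  · simp [h, hx]
  · simp [h]

-- for a black cell, the mill test on the placed board equals the mill test on the board
lemma cm_t_eq_b (b : List Char) (m : Nat) (j : Int) (hm : m < b.length) (h0 : 0 ≤ j)
    (hx : PySem.List.pyGetD b (m : Int) ' ' = 'x')
    (hb : PySem.List.pyGetD b j ' ' = 'B') :
    closeMillA j (PySem.List.pySetD b (m : Int) 'W') = closeMillA j b := by
  have hc : PySem.List.pyGetD (PySem.List.pySetD b (m : Int) 'W') j ' ' = 'B' := by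
    have h := eqB b m hm hx j h0
    rw [hb] at h
    simpa using h
  simp only [closeMillA, hc, hb, eqB b m hm hx 0 (by norm_num), eqB b m hm hx 1 (by norm_num), eqB b m hm hx 2 (by norm_num), eqB b m hm hx 3 (by norm_num), eqB b m hm hx 4 (by norm_num), eqB b m hm hx 5 (by norm_num), eqB b m hm hx 6 (by norm_num), eqB b m hm hx 7 (by norm_num), eqB b m hm hx 8 (by norm_num), eqB b m hm hx 9 (by norm_num), eqB b m hm hx 10 (by norm_num), eqB b m hm hx 11 (by norm_num), eqB b m hm hx 12 (by norm_num), eqB b m hm hx 13 (by norm_num), eqB b m hm hx 14 (by norm_num), eqB b m hm hx 15 (by norm_num), eqB b m hm hx 16 (by norm_num), eqB b m hm hx 17 (by norm_num), eqB b m hm hx 18 (by norm_num), eqB b m hm hx 19 (by norm_num), eqB b m hm hx 20 (by norm_num)]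

-- for a black cell, A's mill test equals membership in B's protected set
lemma cmB (b : List Char) (j : Int) (h0 : 0 ≤ j)
    (hb : PySem.List.pyGetD b j ' ' = 'B') :
    closeMillA j b = PySem.Set.contains (millSets b).2 j := by
  obtain ⟨k, rfl⟩ := Int.eq_ofNat_of_zero_le h0
  rw [Bool.eq_iff_iff, PySem.Set.contains_iff, memP]
  by_cases h21 : k ≤ 20
  · interval_cases k <;> (norm_num at hb; simp [closeMillA, MILLS_B, Cb, hb]; try tauto)
  · simp [closeMillA, MILLS_B, Cb, show (k ≠ 0) from by omega, show (((k:Nat):Int) ≠ 1) from by omega, show (((k:Nat):Int) ≠ 2) from by omega, show (((k:Nat):Int) ≠ 3) from by omega, show (((k:Nat):Int) ≠ 4) from by omega, show (((k:Nat):Int) ≠ 5) from by omega, show (((k:Nat):Int) ≠ 6) from by omega, show (((k:Nat):Int) ≠ 7) from by omega, show (((k:Nat):Int) ≠ 8) from by omega, show (((k:Nat):Int) ≠ 9) from by omega, show (((k:Nat):Int) ≠ 10) from by omega, show (((k:Nat):Int) ≠ 11) from by omega, show (((k:Nat):Int) ≠ 12) from by omega, show (((k:Nat):Int) ≠ 13)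 from by omega, show (((k:Nat):Int) ≠ 14) from by omega, show (((k:Nat):Int) ≠ 15) from by omega, show (((k:Nat):Int) ≠ 16) from by omega, show (((k:Nat):Int) ≠ 17) from by omega, show (((k:Nat):Int) ≠ 18) from by omega, show (((k:Nat):Int) ≠ 19) from by omega, show (((k:Nat):Int) ≠ 20) from by omega]

-- for the placed x-cell, A's mill test on the placed board equals membership in completing
set_option maxHeartbeats 1000000 in
lemma cmW (b : List Char) (m : Nat) (hm : m < b.length)
    (hx : PySem.List.pyGetD b (m : Int) ' ' = 'x') :
    closeMillA (m : Int) (PySem.List.pySetD b (m : Int) 'W')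
      = PySem.Set.contains (millSets b).1 (m : Int) := by
  rw [Bool.eq_iff_iff, PySem.Set.contains_iff, memW]
  by_cases hm0 : m = 0
  · subst hm0
    norm_num at hx
    simp [closeMillA, MILLS_B, Cw, hx, pyGetD_set_int' b 0 (by norm_num) (by exact_mod_cast hm) 0 (by norm_num) 'W' ' ', pyGetD_set_int' b 0 (by norm_num) (by exact_mod_cast hm) 6 (by norm_num) 'W' ' ', pyGetD_set_int' b 0 (by norm_num) (by exact_mod_cast hm) 18 (by norm_num) 'W' ' ']
    try tauto
  by_cases hm1 : m = 1
  · subst hm1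
    norm_num at hx
    simp [closeMillA, MILLS_B, Cw, hx, pyGetD_set_int' b 1 (by norm_num) (by exact_mod_cast hm) 1 (by norm_num) 'W' ' ', pyGetD_set_int' b 1 (by norm_num) (by exact_mod_cast hm) 11 (by norm_num) 'W' ' ', pyGetD_set_int' b 1 (by norm_num) (by exact_mod_cast hm) 20 (by norm_num) 'W' ' ']
    try tauto
  by_cases hm2 : m = 2
  · subst hm2
    norm_num at hx
    simp [closeMillA, MILLS_B, Cw, hx, pyGetD_set_int' b 2 (by norm_num) (by exact_mod_cast hm) 2 (by norm_num) 'W' ' ', pyGetD_set_int' b 2 (by norm_num) (by exact_mod_cast hm) 7 (by norm_num) 'W' ' ', pyGetD_set_int' b 2 (by norm_num) (by exact_mod_cast hm) 15 (by norm_num) 'W' ' ']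
    try tauto
  by_cases hm3 : m = 3
  · subst hm3
    norm_num at hx
    simp [closeMillA, MILLS_B, Cw, hx, pyGetD_set_int' b 3 (by norm_num) (by exact_mod_cast hm) 3 (by norm_num) 'W' ' ', pyGetD_set_int' b 3 (by norm_num) (by exact_mod_cast hm) 10 (by norm_num) 'W' ' ', pyGetD_set_int' b 3 (by norm_num) (by exact_mod_cast hm) 17 (by norm_num) 'W' ' ']
    try tauto
  by_cases hm4 : m = 4
  · subst hm4
    norm_num at hx
    simp [closeMillA, MILLS_B, Cw, hx, pyGetD_set_int' b 4 (by norm_num) (by exact_mod_cast hm) 4 (by norm_num) 'W' ' ', pyGetD_set_int' b 4 (by norm_num) (by exact_mod_cast hm) 8 (by norm_num) 'W' ' ', pyGetD_set_int' b 4 (by norm_num) (by exact_mod_cast hm) 12 (by norm_num) 'W' ' ']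
    try tauto
  by_cases hm5 : m = 5
  · subst hm5
    norm_num at hx
    simp [closeMillA, MILLS_B, Cw, hx, pyGetD_set_int' b 5 (by norm_num) (by exact_mod_cast hm) 5 (by norm_num) 'W' ' ', pyGetD_set_int' b 5 (by norm_num) (by exact_mod_cast hm) 9 (by norm_num) 'W' ' ', pyGetD_set_int' b 5 (by norm_num) (by exact_mod_cast hm) 14 (by norm_num) 'W' ' ']
    try tauto
  by_cases hm6 : m = 6
  · subst hm6
    norm_num at hx
    simp [closeMillA, MILLS_B, Cw, hx, pyGetD_set_int' b 6 (by norm_num) (by exact_mod_cast hm) 6 (by norm_num) 'W' ' ', pyGetD_set_int' b 6 (by norm_num) (by exact_mod_cast hm) 0 (by norm_num) 'W' ' ', pyGetD_set_int' b 6 (by norm_num) (by exact_mod_cast hm) 18 (by norm_num) 'W' ' ', pyGetD_set_int' b 6 (by norm_num) (by exact_mod_cast hm) 7 (by norm_num) 'W' ' ', pyGetD_set_int' b 6 (by norm_num) (by exact_mod_cast hm) 8 (by norm_num) 'W' ' ']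
    try tauto
  by_cases hm7 : m = 7
  · subst hm7
    norm_num at hx
    simp [closeMillA, MILLS_B, Cw, hx, pyGetD_set_int' b 7 (by norm_num) (by exact_mod_cast hm) 7 (by norm_num) 'W' ' ', pyGetD_set_int' b 7 (by norm_num) (by exact_mod_cast hm) 2 (by norm_num) 'W' ' ', pyGetD_set_int' b 7 (by norm_num) (by exact_mod_cast hm) 15 (by norm_num) 'W' ' ', pyGetD_set_int' b 7 (by norm_num) (by exact_mod_cast hm) 6 (by norm_num) 'W' ' ', pyGetD_set_int' b 7 (by norm_num) (by exact_mod_cast hm) 8 (by norm_num) 'W' ' ']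
    try tauto
  by_cases hm8 : m = 8
  · subst hm8
    norm_num at hx
    simp [closeMillA, MILLS_B, Cw, hx, pyGetD_set_int' b 8 (by norm_num) (by exact_mod_cast hm) 8 (by norm_num) 'W' ' ', pyGetD_set_int' b 8 (by norm_num) (by exact_mod_cast hm) 4 (by norm_num) 'W' ' ', pyGetD_set_int' b 8 (by norm_num) (by exact_mod_cast hm) 12 (by norm_num) 'W' ' ', pyGetD_set_int' b 8 (by norm_num) (by exact_mod_cast hm) 6 (by norm_num) 'W' ' ', pyGetD_set_int' b 8 (by norm_num) (by exact_mod_cast hm) 7 (by norm_num) 'W' ' ']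
    try tauto
  by_cases hm9 : m = 9
  · subst hm9
    norm_num at hx
    simp [closeMillA, MILLS_B, Cw, hx, pyGetD_set_int' b 9 (by norm_num) (by exact_mod_cast hm) 9 (by norm_num) 'W' ' ', pyGetD_set_int' b 9 (by norm_num) (by exact_mod_cast hm) 5 (by norm_num) 'W' ' ', pyGetD_set_int' b 9 (by norm_num) (by exact_mod_cast hm) 14 (by norm_num) 'W' ' ', pyGetD_set_int' b 9 (by norm_num) (by exact_mod_cast hm) 10 (by norm_num) 'W' ' ', pyGetD_set_int' b 9 (by norm_num) (by exact_mod_cast hm) 11 (by norm_num) 'W' ' ']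
    try tauto
  by_cases hm10 : m = 10
  · subst hm10
    norm_num at hx
    simp [closeMillA, MILLS_B, Cw, hx, pyGetD_set_int' b 10 (by norm_num) (by exact_mod_cast hm) 10 (by norm_num) 'W' ' ', pyGetD_set_int' b 10 (by norm_num) (by exact_mod_cast hm) 3 (by norm_num) 'W' ' ', pyGetD_set_int' b 10 (by norm_num) (by exact_mod_cast hm) 17 (by norm_num) 'W' ' ', pyGetD_set_int' b 10 (by norm_num) (by exact_mod_cast hm) 9 (by norm_num) 'W' ' ', pyGetD_set_int' b 10 (by norm_num) (by exact_mod_cast hm) 11 (by norm_num) 'W' ' ']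
    try tauto
  by_cases hm11 : m = 11
  · subst hm11
    norm_num at hx
    simp [closeMillA, MILLS_B, Cw, hx, pyGetD_set_int' b 11 (by norm_num) (by exact_mod_cast hm) 11 (by norm_num) 'W' ' ', pyGetD_set_int' b 11 (by norm_num) (by exact_mod_cast hm) 1 (by norm_num) 'W' ' ', pyGetD_set_int' b 11 (by norm_num) (by exact_mod_cast hm) 20 (by norm_num) 'W' ' ', pyGetD_set_int' b 11 (by norm_num) (by exact_mod_cast hm) 9 (by norm_num) 'W' ' ', pyGetD_set_int' b 11 (by norm_num) (by exact_mod_cast hm) 10 (by norm_num) 'W' ' ']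
    try tauto
  by_cases hm12 : m = 12
  · subst hm12
    norm_num at hx
    simp [closeMillA, MILLS_B, Cw, hx, pyGetD_set_int' b 12 (by norm_num) (by exact_mod_cast hm) 12 (by norm_num) 'W' ' ', pyGetD_set_int' b 12 (by norm_num) (by exact_mod_cast hm) 4 (by norm_num) 'W' ' ', pyGetD_set_int' b 12 (by norm_num) (by exact_mod_cast hm) 8 (by norm_num) 'W' ' ', pyGetD_set_int' b 12 (by norm_num) (by exact_mod_cast hm) 13 (by norm_num) 'W' ' ', pyGetD_set_int' b 12 (by norm_num) (by exact_mod_cast hm) 14 (by norm_num) 'W' ' ']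
    try tauto
  by_cases hm13 : m = 13
  · subst hm13
    norm_num at hx
    simp [closeMillA, MILLS_B, Cw, hx, pyGetD_set_int' b 13 (by norm_num) (by exact_mod_cast hm) 13 (by norm_num) 'W' ' ', pyGetD_set_int' b 13 (by norm_num) (by exact_mod_cast hm) 12 (by norm_num) 'W' ' ', pyGetD_set_int' b 13 (by norm_num) (by exact_mod_cast hm) 14 (by norm_num) 'W' ' ', pyGetD_set_int' b 13 (by norm_num) (by exact_mod_cast hm) 16 (by norm_num) 'W' ' ', pyGetD_set_int' b 13 (by norm_num) (by exact_mod_cast hm) 19 (by norm_num) 'W' ' ']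
    try tauto
  by_cases hm14 : m = 14
  · subst hm14
    norm_num at hx
    simp [closeMillA, MILLS_B, Cw, hx, pyGetD_set_int' b 14 (by norm_num) (by exact_mod_cast hm) 14 (by norm_num) 'W' ' ', pyGetD_set_int' b 14 (by norm_num) (by exact_mod_cast hm) 5 (by norm_num) 'W' ' ', pyGetD_set_int' b 14 (by norm_num) (by exact_mod_cast hm) 9 (by norm_num) 'W' ' ', pyGetD_set_int' b 14 (by norm_num) (by exact_mod_cast hm) 12 (by norm_num) 'W' ' ', pyGetD_set_int' b 14 (by norm_num) (by exact_mod_cast hm) 13 (by norm_num) 'W' ' ']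
    try tauto
  by_cases hm15 : m = 15
  · subst hm15
    norm_num at hx
    simp [closeMillA, MILLS_B, Cw, hx, pyGetD_set_int' b 15 (by norm_num) (by exact_mod_cast hm) 15 (by norm_num) 'W' ' ', pyGetD_set_int' b 15 (by norm_num) (by exact_mod_cast hm) 2 (by norm_num) 'W' ' ', pyGetD_set_int' b 15 (by norm_num) (by exact_mod_cast hm) 7 (by norm_num) 'W' ' ', pyGetD_set_int' b 15 (by norm_num) (by exact_mod_cast hm) 16 (by norm_num) 'W' ' ', pyGetD_set_int' b 15 (by norm_num) (by exact_mod_cast hm) 17 (by norm_num) 'W' ' ']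
    try tauto
  by_cases hm16 : m = 16
  · subst hm16
    norm_num at hx
    simp [closeMillA, MILLS_B, Cw, hx, pyGetD_set_int' b 16 (by norm_num) (by exact_mod_cast hm) 16 (by norm_num) 'W' ' ', pyGetD_set_int' b 16 (by norm_num) (by exact_mod_cast hm) 13 (by norm_num) 'W' ' ', pyGetD_set_int' b 16 (by norm_num) (by exact_mod_cast hm) 19 (by norm_num) 'W' ' ', pyGetD_set_int' b 16 (by norm_num) (by exact_mod_cast hm) 15 (by norm_num) 'W' ' ', pyGetD_set_int' b 16 (by norm_num) (by exact_mod_cast hm) 17 (by norm_num) 'W' ' ']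
    try tauto
  by_cases hm17 : m = 17
  · subst hm17
    norm_num at hx
    simp [closeMillA, MILLS_B, Cw, hx, pyGetD_set_int' b 17 (by norm_num) (by exact_mod_cast hm) 17 (by norm_num) 'W' ' ', pyGetD_set_int' b 17 (by norm_num) (by exact_mod_cast hm) 3 (by norm_num) 'W' ' ', pyGetD_set_int' b 17 (by norm_num) (by exact_mod_cast hm) 10 (by norm_num) 'W' ' ', pyGetD_set_int' b 17 (by norm_num) (by exact_mod_cast hm) 15 (by norm_num) 'W' ' ', pyGetD_set_int' b 17 (by norm_num) (by exact_mod_cast hm) 16 (by norm_num) 'W' ' ']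
    try tauto
  by_cases hm18 : m = 18
  · subst hm18
    norm_num at hx
    simp [closeMillA, MILLS_B, Cw, hx, pyGetD_set_int' b 18 (by norm_num) (by exact_mod_cast hm) 18 (by norm_num) 'W' ' ', pyGetD_set_int' b 18 (by norm_num) (by exact_mod_cast hm) 0 (by norm_num) 'W' ' ', pyGetD_set_int' b 18 (by norm_num) (by exact_mod_cast hm) 6 (by norm_num) 'W' ' ', pyGetD_set_int' b 18 (by norm_num) (by exact_mod_cast hm) 19 (by norm_num) 'W' ' ', pyGetD_set_int' b 18 (by norm_num) (by exact_mod_cast hm) 20 (by norm_num) 'W' ' ']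
    try tauto
  by_cases hm19 : m = 19
  · subst hm19
    norm_num at hx
    simp [closeMillA, MILLS_B, Cw, hx, pyGetD_set_int' b 19 (by norm_num) (by exact_mod_cast hm) 19 (by norm_num) 'W' ' ', pyGetD_set_int' b 19 (by norm_num) (by exact_mod_cast hm) 16 (by norm_num) 'W' ' ', pyGetD_set_int' b 19 (by norm_num) (by exact_mod_cast hm) 13 (by norm_num) 'W' ' ', pyGetD_set_int' b 19 (by norm_num) (by exact_mod_cast hm) 18 (by norm_num) 'W' ' ', pyGetD_set_int' b 19 (by norm_num) (by exact_mod_cast hm) 20 (by norm_num) 'W' ' ']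
    try tauto
  by_cases hm20 : m = 20
  · subst hm20
    norm_num at hx
    simp [closeMillA, MILLS_B, Cw, hx, pyGetD_set_int' b 20 (by norm_num) (by exact_mod_cast hm) 20 (by norm_num) 'W' ' ', pyGetD_set_int' b 20 (by norm_num) (by exact_mod_cast hm) 1 (by norm_num) 'W' ' ', pyGetD_set_int' b 20 (by norm_num) (by exact_mod_cast hm) 11 (by norm_num) 'W' ' ', pyGetD_set_int' b 20 (by norm_num) (by exact_mod_cast hm) 18 (by norm_num) 'W' ' ', pyGetD_set_int' b 20 (by norm_num) (by exact_mod_cast hm) 19 (by norm_num) 'W' ' ']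
    try tauto
  have h21 : 21 ≤ m := by omega
  simp [closeMillA, MILLS_B, Cw, show (m ≠ 0) from by omega, show (((m:Nat):Int) ≠ 1) from by omega, show (((m:Nat):Int) ≠ 2) from by omega, show (((m:Nat):Int) ≠ 3) from by omega, show (((m:Nat):Int) ≠ 4) from by omega, show (((m:Nat):Int) ≠ 5) from by omega, show (((m:Nat):Int) ≠ 6) from by omega, show (((m:Nat):Int) ≠ 7) from by omega, show (((m:Nat):Int) ≠ 8) from by omega, show (((m:Nat):Int) ≠ 9) from by omega, show (((m:Nat):Int) ≠ 10) from by omega, show (((m:Nat):Int) ≠ 11) from by omega, show (((m:Nat):Int) ≠ 12) from by omega, show (((m:Nat):Int) ≠ 13) from by omega, show (((m:Nat):Int) ≠ 14) from by omega, show (((m:Nat):Int) ≠ 15) from by omega, show (((m:Nat):Int) ≠ 16) from by omega, show (((m:Nat):Int) ≠ 17) from by omega, show (((m:Nat):Int) ≠ 18) from by omega, show (((m:Nat):Int) ≠ 19) from by omega, show (((m:Nat):Int) ≠ 20) from by omega]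

-- a guarded filterMap is empty exactly when no element passes the guard
lemma filterMap_guard_empty {A B : Type} (l : List A) (p : A → Bool) (f : A → B) :
    (l.filterMap (fun x => if p x then some (f x) else none) = []) ↔ l.any p = false := by
  simp only [List.filterMap_eq_nil_iff, List.any_eq_false, Bool.not_eq_true]
  constructor
  · intro h a ha
    by_cases hpa : p a = true
    · have := h a ha; simp [hpa] at this
    · simpa using hpa
  · intro h a ha
    simp [h a ha]

-- the flag-and-append loop of A's generate_remove, characterised
lemma gr_fold (t : List Char) (l : List (Int × Char)) (flag : Bool) (ml : List String) :
    l.foldl (fun (st : Bool × List String) lp =>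
      if lp.2 == 'B' then
        if !closeMillA lp.1 t then
          (false, st.2 ++ [String.ofList (PySem.List.pySetD t lp.1 'x')])
        else st
      else st) (flag, ml)
    = (flag && !(l.any (fun lp => lp.2 == 'B' && !closeMillA lp.1 t)),
       ml ++ l.filterMap (fun lp =>
         if lp.2 == 'B' && !closeMillA lp.1 t
         then some (String.ofList (PySem.List.pySetD t lp.1 'x')) else none)) := by
  induction l generalizing flag ml with
  | nil => simp
  | cons hd tl ih =>
    simp only [List.foldl_cons, List.any_cons, List.filterMap_cons]
    by_cases h1 : (hd.2 == 'B') = true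
    · by_cases h2 : (!closeMillA hd.1 t) = true
      · rw [if_pos h1, if_pos h2, ih]; simp [h1, h2]
      · rw [if_pos h1, if_neg h2, ih]; simp only [Bool.not_eq_true] at h2
        simp [h1, h2]
    · rw [if_neg h1, ih]; simp only [Bool.not_eq_true] at h1; simp [h1]

-- A's generate_remove appends the removal list, or the board itself when it is empty
lemma gr_eq2 (t : List Char) (acc : List String) :
    generate_removeA t acc
    = acc ++ (let L := (PySem.List.enumerate t 0).filterMap (fun lp =>
        if lp.2 == 'B' && !closeMillA lp.1 t
        then some (String.ofList (PySem.List.pySetD t lp.1 'x')) else none)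
      if L.isEmpty then [String.ofList t] else L) := by
  unfold generate_removeA
  rw [gr_fold]
  set L := (PySem.List.enumerate t 0).filterMap (fun lp =>
    if lp.2 == 'B' && !closeMillA lp.1 t
    then some (String.ofList (PySem.List.pySetD t lp.1 'x')) else none) with hL
  by_cases hLe : L.isEmpty = true
  · have h0 : L = [] := List.isEmpty_iff.mp hLe
    have hany : ((PySem.List.enumerate t 0).any
        (fun lp => lp.2 == 'B' && !closeMillA lp.1 t)) = false :=
      (filterMap_guard_empty _ _ _).mp (hL ▸ h0)
    simp [hany, h0]
  · have h0 : L ≠ [] := fun h => hLe (List.isEmpty_iff.mpr h)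
    have hany : ((PySem.List.enumerate t 0).any
        (fun lp => lp.2 == 'B' && !closeMillA lp.1 t)) = true := by
      by_contra h
      exact h0 (hL ▸ (filterMap_guard_empty _ _ _).mpr (eq_false_of_ne_true h))
    simp [hany, eq_false_of_ne_true hLe]

-- a fold whose step ignores every element of the list is the identity
lemma foldl_const {A B : Type} (l : List A) (f : B → A → B) (init : B)
    (h : ∀ x ∈ l, ∀ acc, f acc x = acc) : l.foldl f init = init := by
  induction l generalizing init with
  | nil => rfl
  | cons hd tl ih =>
    rw [List.foldl_cons, h hd (by simp)]
    exact ih init (fun x hx acc => h x (by simp [hx]) acc)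

-- A's removal boards for the placed board t = b[k := 'W'] are B's shared removable list
-- mapped over t (black cells and black mills of t coincide with those of b)
lemma removals_eq (b : List Char) (k : Nat) (hk : k < b.length)
    (hxk : PySem.List.pyGetD b (k : Int) ' ' = 'x') :
    (PySem.List.enumerate (PySem.List.pySetD b (k : Int) 'W') 0).filterMap (fun lp =>
       if lp.2 == 'B' && !closeMillA lp.1 (PySem.List.pySetD b (k : Int) 'W')
       then some (String.ofList
         (PySem.List.pySetD (PySem.List.pySetD b (k : Int) 'W') lp.1 'x')) else none)
    = ((PySem.List.enumerate b 0).filterMap (fun jq =>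
         if jq.2 == 'B' && !(PySem.Set.contains (millSets b).2 jq.1)
         then some jq.1 else none)).map
        (fun j => String.ofList (placeB (PySem.List.pySetD b (k : Int) 'W') j 'x')) := by
  set t := PySem.List.pySetD b (k : Int) 'W' with ht
  rw [List.map_filterMap]
  rw [PySem.List.enumerate_eq_map_pyRange t ' ', PySem.List.enumerate_eq_map_pyRange b ' ']
  rw [List.filterMap_map, List.filterMap_map]
  have hlen : PySem.List.len t = PySem.List.len b := by
    simp [PySem.List.len_eq, ht]
  rw [hlen]
  apply List.filterMap_congr
  intro j hj
  obtain ⟨hj0, hj1⟩ := PySem.List.mem_pyRange_one.mp hj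
  have hj1' : j < (b.length : Int) := by simpa [PySem.List.len_eq] using hj1
  simp only [Function.comp]
  rw [ht, eqB b k hk hxk j hj0]
  by_cases hbj : (PySem.List.pyGetD b j ' ' == 'B') = true
  · have hbj' : PySem.List.pyGetD b j ' ' = 'B' := by simpa using hbj
    rw [cm_t_eq_b b k j hk hj0 hxk hbj', cmB b j hj0 hbj']
    rw [place_eq' t j hj0 (by simpa [ht, PySem.List.length_pySetD] using hj1') 'x']
    split_ifs <;> simp [ht]
  · simp [hbj]

-- ===== VERDICT (by name: the statement is the Claim_ definition above) =====
theorem generate_add_spec : Claim_equal_generate_add := by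
  intro board _ hpre
  unfold Spec_generate_add generate_add generate_add_alt
  by_cases hx : board.toList.contains 'x'
  · have hmem : 'x' ∈ board.toList := List.mem_of_elem_eq_true hx
    rw [if_neg (by simp [hmem])]
    have hlen : 21 ≤ board.toList.length := hpre hmem
    apply PySem.List.foldl_congr_mem'
    intro lp hlp acc
    obtain ⟨k, hk, rfl⟩ := (PySem.List.mem_enumerate_iff _ _ _).mp hlp
    simp only [zero_add]
    by_cases hpx : (board.toList[k] == 'x') = true
    · rw [if_pos hpx, if_pos hpx]
      have hxk : PySem.List.pyGetD board.toList (k : Int) ' ' = 'x' := by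
        rw [PySem.List.pyGetD_natCast, List.getD_eq_getElem?_getD, List.getElem?_eq_getElem hk]
        simpa using hpx
      rw [← place_eq board.toList k hk 'W', cmW board.toList k hk hxk]
      by_cases hc : (PySem.Set.contains (millSets board.toList).1 (k : Int)) = true
      · rw [if_pos hc, if_pos hc, gr_eq2]
        rw [removals_eq board.toList k hk hxk]
      · rw [if_neg hc, if_neg hc]
    · rw [if_neg hpx, if_neg hpx]
  · have hmem : 'x' ∉ board.toList := fun hmem => hx (List.elem_eq_true_of_mem hmem)
    rw [if_pos (by simp [hmem])]
    apply foldl_const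
    intro p hp acc
    obtain ⟨k, hk, rfl⟩ := (PySem.List.mem_enumerate_iff _ _ _).mp hp
    have hne : ¬ (board.toList[k] == 'x') = true := by
      intro h
      exact hmem (by simpa using ((beq_iff_eq).mp h) ▸ List.getElem_mem hk)
    simp [hne]
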